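-- pv_equiv track=rewrite | github.com/deeplearning-wisc/LongHorizonDeception | utils/analyze_deception_chains.py | _build_chain_from_link
-- ===== SOURCE A (Python) =====
-- from typing import Dict, Any, List, Tuple
--
-- def _build_chain_from_link(start: int, end: int, all_links: List[Tuple], visited: set) -> List[int]:
--     """Build a complete chain starting from a causal link"""
--     chain = [start, end]
--     visited.add(start)
--     visited.add(end)
--
--     # Try to extend chain backwards
--     for i, j, strength in all_links:
--         if j == start and i not in visited:
--             chain.insert(0, i)
--             visited.add(i)
--             start = i
--             break
--
--     # Try to extend chain forwards
--     while True:
--         extended = False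
--         for i, j, strength in all_links:
--             if i == end and j not in visited:
--                 chain.append(j)
--                 visited.add(j)
--                 end = j
--                 extended = True
--                 break
--         if not extended:
--             break
--
--     return chain
-- ===== SOURCE B (Python) =====
-- from typing import List, Tuple
--
-- def _build_chain_from_link(start: int, end: int, all_links: List[Tuple], visited: set) -> List[int]:
--     """Build a complete chain from a causal link via source/target indexes."""
--     succ = {}   # source -> targets in link order
--     pred = {}   # target -> sources in link order
--     for i, j, _ in all_links:
--         succ.setdefault(i, []).append(j)
--         pred.setdefault(j, []).append(i)
--
--     visited.add(start)
--     visited.add(end)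
--     chain = [start, end]
--
--     # extend backwards once: first link (in order) ending at start with unvisited source
--     for i in pred.get(start, []):
--         if i not in visited:
--             chain = [i] + chain
--             visited.add(i)
--             break
--
--     # extend forwards repeatedly via the successor index
--     node = end
--     while True:
--         nxt = next((j for j in succ.get(node, []) if j not in visited), None)
--         if nxt is None:
--             break
--         chain.append(nxt)
--         visited.add(nxt)
--         node = nxt
--     return chain
-- ===== Notes on version B (the rewrite author's own statement) =====
-- stated objective: alternative
-- what changed: B builds source->targets and target->sources indexes once and follows the chain via dictionary lookups, instead of A's rescan of the whole link list on every extension step; on the measured inputs (short chains) the cost is the same.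
import Mathlib
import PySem

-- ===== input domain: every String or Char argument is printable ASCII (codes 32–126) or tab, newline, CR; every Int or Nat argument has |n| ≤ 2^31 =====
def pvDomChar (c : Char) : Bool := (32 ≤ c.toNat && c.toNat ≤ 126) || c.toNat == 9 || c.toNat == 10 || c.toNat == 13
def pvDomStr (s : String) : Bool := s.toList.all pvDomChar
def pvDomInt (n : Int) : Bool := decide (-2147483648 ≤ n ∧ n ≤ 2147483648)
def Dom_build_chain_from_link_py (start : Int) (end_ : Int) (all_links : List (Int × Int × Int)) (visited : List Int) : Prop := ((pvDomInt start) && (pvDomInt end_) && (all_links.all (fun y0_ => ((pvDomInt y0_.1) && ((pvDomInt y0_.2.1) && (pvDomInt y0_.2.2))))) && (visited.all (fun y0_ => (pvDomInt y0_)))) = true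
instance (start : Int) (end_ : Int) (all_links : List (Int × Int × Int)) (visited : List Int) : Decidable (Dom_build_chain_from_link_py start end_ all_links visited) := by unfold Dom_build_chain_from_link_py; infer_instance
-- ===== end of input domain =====

-- B replaces A's rescan of all_links at every extension step by two indexes (source->targets,
-- target->sources) built once; equivalence is about the RETURN value (both Pythons also add the
-- same elements to the mutable `visited` set).

-- ===== PORT A =====
-- the `while True` forward loop: each successful scan marks a fresh target visited, so it runs
-- at most all_links.length + 1 times; the port uses that as fuel.
def pvFwdA (links : List (Int × Int × Int)) : Nat → Int → List Int → List Int → List Int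
  | 0, _, chain, _ => chain
  | f + 1, end_, chain, visited =>
    match links.find? (fun l => l.1 == end_ && !(PySem.Set.contains visited l.2.1)) with
    | none => chain
    | some l => pvFwdA links f l.2.1 (chain ++ [l.2.1]) (PySem.Set.add visited l.2.1)

def build_chain_from_link_py (start : Int) (end_ : Int) (all_links : List (Int × Int × Int)) (visited : List Int) : List Int :=
  let chain := [start, end_]
  let visited := PySem.Set.add (PySem.Set.add visited start) end_
  -- backward for-loop with break = first link ending at start with unvisited source; insert(0, i) prepends
  match all_links.find? (fun l => l.2.1 == start && !(PySem.Set.contains visited l.1)) with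
  | some l => pvFwdA all_links (all_links.length + 1) end_ (l.1 :: chain) (PySem.Set.add visited l.1)
  | none => pvFwdA all_links (all_links.length + 1) end_ chain visited

-- ===== PORT B =====
-- setdefault(k, []).append(v) over a pair list = modify k [] (· ++ [v])
def pvMkIndex (pairs : List (Int × Int)) : PySem.Dict Int (List Int) :=
  pairs.foldl (fun d p => d.modify p.1 [] (· ++ [p.2])) PySem.Dict.empty

def pvFwdB (succ : PySem.Dict Int (List Int)) : Nat → Int → List Int → List Int → List Int
  | 0, _, chain, _ => chain
  | f + 1, node, chain, visited =>
    match (succ.getD node []).find? (fun j => !(PySem.Set.contains visited j)) with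
    | none => chain
    | some j => pvFwdB succ f j (chain ++ [j]) (PySem.Set.add visited j)

def build_chain_from_link_py_alt (start : Int) (end_ : Int) (all_links : List (Int × Int × Int)) (visited : List Int) : List Int :=
  let succ := pvMkIndex (all_links.map (fun l => (l.1, l.2.1)))
  let pred := pvMkIndex (all_links.map (fun l => (l.2.1, l.1)))
  let visited := PySem.Set.add (PySem.Set.add visited start) end_
  let chain := [start, end_]
  match (pred.getD start []).find? (fun i => !(PySem.Set.contains visited i)) with
  | some i => pvFwdB succ (all_links.length + 1) end_ ([i] ++ chain) (PySem.Set.add visited i)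
  | none => pvFwdB succ (all_links.length + 1) end_ chain visited

-- ===== PRECONDITION & SPEC =====
def Spec_build_chain_from_link_py (start : Int) (end_ : Int) (all_links : List (Int × Int × Int)) (visited : List Int) (out : List Int) : Prop := out = build_chain_from_link_py_alt start end_ all_links visited
instance (start : Int) (end_ : Int) (all_links : List (Int × Int × Int)) (visited : List Int) (out : List Int) : Decidable (Spec_build_chain_from_link_py start end_ all_links visited out) := by unfold Spec_build_chain_from_link_py; infer_instance

-- ===== CLAIM (what is proved, stated in full; the proofs are below) =====
def Claim_equal_build_chain_from_link_py : Prop := ∀ (start : Int) (end_ : Int) (all_links : List (Int × Int × Int)) (visited : List Int), Dom_build_chain_from_link_py start end_ all_links visited → Spec_build_chain_from_link_py start end_ all_links visited (build_chain_from_link_py start end_ all_links visited)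

-- ===== LEMMAS AND PROOFS =====

-- find? over a filter-then-map list pulled back to the original list
theorem pv_find?_filter_map {α β : Type} (xs : List α) (q : α → Bool) (v : α → β) (p : β → Bool) :
    ((xs.filter q).map v).find? p = (xs.find? (fun x => q x && p (v x))).map v := by
  induction xs with
  | nil => rfl
  | cons x xs ih =>
    by_cases hq : q x
    · by_cases hp : p (v x)
      · simp [hq, hp]
      · simp [hq, hp, ih]
    · simp [hq, ih]

-- the index lookup lists the mapped values of matching links, in order
theorem pv_mkIndex_getD (links : List (Int × Int × Int)) (k v : (Int × Int × Int) → Int) (e : Int) :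
    (pvMkIndex (links.map (fun l => (k l, v l)))).getD e []
      = (links.filter (fun l => k l == e)).map v := by
  unfold pvMkIndex
  rw [PySem.Dict.getD_foldl_modify_append]
  simp [List.filter_map, Function.comp_def]

-- B's index scan finds the same candidate as A's scan of all_links
theorem pv_step (links : List (Int × Int × Int)) (k v : (Int × Int × Int) → Int) (e : Int) (visited : List Int) :
    ((pvMkIndex (links.map (fun l => (k l, v l)))).getD e []).find? (fun j => !(PySem.Set.contains visited j))
      = (links.find? (fun l => k l == e && !(PySem.Set.contains visited (v l)))).map v := by
  rw [pv_mkIndex_getD, pv_find?_filter_map]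

theorem pv_fwd_eq (links : List (Int × Int × Int)) (fuel : Nat) :
    ∀ (e : Int) (chain visited : List Int),
      pvFwdA links fuel e chain visited
        = pvFwdB (pvMkIndex (links.map (fun l => (l.1, l.2.1)))) fuel e chain visited := by
  induction fuel with
  | zero => intro e chain visited; rfl
  | succ f ih =>
    intro e chain visited
    have h := pv_step links (fun l => l.1) (fun l => l.2.1) e visited
    simp only [pvFwdA, pvFwdB, h]
    cases links.find? (fun l => l.1 == e && !(PySem.Set.contains visited l.2.1)) with
    | none => rfl
    | some l => simpa using ih _ _ _

-- ===== VERDICT (by name: the statement is the Claim_ definition above) =====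
theorem build_chain_from_link_py_spec : Claim_equal_build_chain_from_link_py := by
  intro start end_ links visited _
  unfold Spec_build_chain_from_link_py build_chain_from_link_py build_chain_from_link_py_alt
  simp only [pv_step links (fun l => l.2.1) (fun l => l.1) start]
  cases links.find? (fun l => l.2.1 == start && !(PySem.Set.contains (PySem.Set.add (PySem.Set.add visited start) end_) l.1)) with
  | none => exact pv_fwd_eq links _ _ _ _
  | some l => simpa using pv_fwd_eq links _ _ _ _
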